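-- pv_equiv track=rewrite | github.com/farhanlead1/batch3 | master/check_metadata.py | snippetTypeCheck
-- ===== SOURCE A (Python) =====
-- def snippetTypeCheck(words):
--     author = 'sourcetype:['
--     matching = [s for s in words if author in s]
--     containsType = False
--     if not matching:
--         containsType = False
--     for match in matching:
--         if match.startswith('sourcetype:[full-example'):
--             containsType = True
--             break
--         elif match.startswith('sourcetype:[snippet'):
--             containsType = True
--             break
--     if not containsType:
--         if warn:
--             return "WARNING -- Missing snippet-sourcetype:[full-example] or snippet-sourcetype:[snippet]"
--
-- warn = True
-- ===== SOURCE B (Python) =====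
-- def snippetTypeCheck(words):
--     containsType = any(s.startswith('sourcetype:[full-example')
--                        or s.startswith('sourcetype:[snippet') for s in words)
--     if not containsType:
--         if warn:
--             return "WARNING -- Missing snippet-sourcetype:[full-example] or snippet-sourcetype:[snippet]"
--
-- warn = True
-- ===== Notes on version B (the rewrite author's own statement) =====
-- stated objective: simpler
-- what changed: Drops the intermediate 'matching' filter pass and the dead containsType reset: a single short-circuiting any() over words decides the warning directly (valid because a string starting with either prefix necessarily contains 'sourcetype:[').
import Mathlib
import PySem

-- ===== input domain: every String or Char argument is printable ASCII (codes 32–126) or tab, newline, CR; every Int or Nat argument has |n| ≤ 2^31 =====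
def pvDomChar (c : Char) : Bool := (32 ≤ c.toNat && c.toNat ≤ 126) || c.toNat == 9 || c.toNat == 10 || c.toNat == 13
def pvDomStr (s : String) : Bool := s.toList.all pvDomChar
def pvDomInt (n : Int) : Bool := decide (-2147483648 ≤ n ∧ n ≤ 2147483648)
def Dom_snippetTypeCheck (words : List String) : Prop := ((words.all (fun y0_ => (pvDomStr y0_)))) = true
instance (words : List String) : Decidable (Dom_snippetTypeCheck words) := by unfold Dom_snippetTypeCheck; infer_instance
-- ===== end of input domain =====

-- B replaces A's filter-then-scan with one short-circuiting pass (any of two startswith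
-- tests); return value unchanged. Module global `warn = True` is ported as the constant pvWarn.
-- ===== PORT A =====
def pvWarn : Bool := true

def pvWarnMsg : String := "WARNING -- Missing snippet-sourcetype:[full-example] or snippet-sourcetype:[snippet]"

-- the `for match in matching: … break` loop, carried state is containsType (starts false)
def snippetTypeCheckLoop : List String → Bool
  | [] => false
  | m :: rest =>
    if PySem.Str.startswith m "sourcetype:[full-example" then true
    else if PySem.Str.startswith m "sourcetype:[snippet" then true
    else snippetTypeCheckLoop rest

def snippetTypeCheck (words : List String) : Option String :=
  let matching := words.filter (fun s => PySem.Str.isIn "sourcetype:[" s)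
  let containsType := snippetTypeCheckLoop matching
  if !containsType then
    if pvWarn then some pvWarnMsg else none
  else none

-- ===== PORT B =====
def snippetTypeCheck_alt (words : List String) : Option String :=
  let containsType := words.any (fun s =>
    PySem.Str.startswith s "sourcetype:[full-example" || PySem.Str.startswith s "sourcetype:[snippet")
  if !containsType then
    if pvWarn then some pvWarnMsg else none
  else none

-- ===== PRECONDITION & SPEC =====
def Spec_snippetTypeCheck (words : List String) (out : Option String) : Prop := out = snippetTypeCheck_alt words
instance (words : List String) (out : Option String) : Decidable (Spec_snippetTypeCheck words out) := by unfold Spec_snippetTypeCheck; infer_instance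

-- ===== CLAIM (what is proved, stated in full; the proofs are below) =====
def Claim_equal_snippetTypeCheck : Prop := ∀ (words : List String), Dom_snippetTypeCheck words → Spec_snippetTypeCheck words (snippetTypeCheck words)

-- ===== LEMMAS AND PROOFS =====

lemma startswith_isIn (s p : String) (h : PySem.Str.startswith s ("sourcetype:[" ++ p) = true) :
    PySem.Str.isIn "sourcetype:[" s = true := by
  rw [PySem.Str.isIn_iff_infix]
  have hp : ("sourcetype:[" ++ p).toList <+: s.toList := by
    have := (PySem.Chars.startswith_iff s.toList ("sourcetype:[" ++ p).toList).1 (by simpa using h)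
    exact this
  refine List.IsPrefix.isInfix (List.IsPrefix.trans ?_ hp)
  simp [String.toList_append]

lemma loop_filter_eq_any (words : List String) :
    snippetTypeCheckLoop (words.filter (fun s => PySem.Str.isIn "sourcetype:[" s)) =
      words.any (fun s =>
        PySem.Str.startswith s "sourcetype:[full-example" || PySem.Str.startswith s "sourcetype:[snippet") := by
  induction words with
  | nil => rfl
  | cons w rest ih =>
    by_cases hw : PySem.Str.isIn "sourcetype:[" w = true
    · simp only [List.filter_cons, hw, if_true, List.any_cons, snippetTypeCheckLoop]
      by_cases h1 : PySem.Str.startswith w "sourcetype:[full-example" = true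
      · simp only [h1, if_true, Bool.true_or]
      · by_cases h2 : PySem.Str.startswith w "sourcetype:[snippet" = true
        · simp only [Bool.not_eq_true] at h1
          simp only [h1, h2, Bool.false_eq_true, if_false, if_true,
            Bool.false_or, Bool.true_or]
        · simp only [Bool.not_eq_true] at h1 h2
          simp only [h1, h2, Bool.false_eq_true, if_false, Bool.false_or, ih]
    · have hw' : PySem.Str.isIn "sourcetype:[" w = false := by
        simpa using hw
      have h1 : PySem.Str.startswith w "sourcetype:[full-example" = false := by
        by_contra hc
        exact hw (startswith_isIn w "full-example" (by simpa using Bool.of_not_eq_false hc))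
      have h2 : PySem.Str.startswith w "sourcetype:[snippet" = false := by
        by_contra hc
        exact hw (startswith_isIn w "snippet" (by simpa using Bool.of_not_eq_false hc))
      simp only [List.filter_cons, hw', Bool.false_eq_true, if_false, List.any_cons, h1, h2,
        Bool.false_or, ih]

-- ===== VERDICT (by name: the statement is the Claim_ definition above) =====
theorem snippetTypeCheck_spec : Claim_equal_snippetTypeCheck := by
  intro words _
  show snippetTypeCheck words = snippetTypeCheck_alt words
  simp only [snippetTypeCheck, snippetTypeCheck_alt, loop_filter_eq_any]
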